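-- pv_equiv track=rewrite | github.com/rcpsilva/BCC325_ArtificialIntelligence | 2023-1/SourceCode/LogicalAgents/logiccal_agents.py | get_minimal_explanations
-- ===== SOURCE A (Python) =====
-- def get_minimal_explanations(explicacoes):
--
--     not_minimal = []
--
--     for i in range(len(explicacoes)):
--         for j in range(len(explicacoes)):
--             if i != j:
--                 if explicacoes[j].issubset(explicacoes[i]):
--                     not_minimal.append(i)
--
--     return [explicacoes[i] for i in range(len(explicacoes)) if i not in not_minimal]
-- ===== SOURCE B (Python) =====
-- def get_minimal_explanations(explicacoes):
--     n = len(explicacoes)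
--     order = sorted(range(n), key=lambda k: len(explicacoes[k]))
--     result = []
--     for i in range(n):
--         si = explicacoes[i]
--         minimal = True
--         for j in order:
--             if len(explicacoes[j]) > len(si):
--                 break
--             if j != i and explicacoes[j] <= si:
--                 minimal = False
--                 break
--         if minimal:
--             result.append(explicacoes[i])
--     return result
-- ===== Notes on version B (the rewrite author's own statement) =====
-- stated objective: faster
-- what changed: Instead of A's flat all-pairs double loop plus a membership filter, B sorts the indices by set cardinality once and, for each set, scans candidate subsets in increasing-size order, breaking off at the first candidate whose size exceeds the set's own (a subset can never be larger); survivors are emitted directly in original input order.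
import Mathlib
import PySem

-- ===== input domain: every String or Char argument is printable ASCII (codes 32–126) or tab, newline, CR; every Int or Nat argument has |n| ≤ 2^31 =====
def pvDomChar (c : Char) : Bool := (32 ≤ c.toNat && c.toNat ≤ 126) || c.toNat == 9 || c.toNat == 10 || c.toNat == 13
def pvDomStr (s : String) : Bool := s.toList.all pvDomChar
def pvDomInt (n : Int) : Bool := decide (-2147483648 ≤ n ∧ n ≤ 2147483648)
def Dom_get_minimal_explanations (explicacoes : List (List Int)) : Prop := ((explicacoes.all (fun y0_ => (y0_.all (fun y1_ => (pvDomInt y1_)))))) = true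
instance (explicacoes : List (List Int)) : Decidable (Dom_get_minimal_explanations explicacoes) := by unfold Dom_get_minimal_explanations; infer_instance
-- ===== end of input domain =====

-- B replaces A's flat all-pairs double loop by a sort-by-cardinality pass whose inner scan
-- stops at the first candidate larger than the current set; measured faster in a timing run.


-- ===== PORT A =====
def get_minimal_explanations (explicacoes : List (List Int)) : List (List Int) :=
  let n : Int := explicacoes.length
  let notMinimal : List Int :=
    (PySem.List.pyRange 0 n 1).foldl (fun acc i =>
      (PySem.List.pyRange 0 n 1).foldl (fun acc2 j =>
        if i ≠ j then
          if PySem.Set.issubset (PySem.List.pyGetD explicacoes j [])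
              (PySem.List.pyGetD explicacoes i []) then
            acc2 ++ [i]
          else acc2
        else acc2) acc) []
  ((PySem.List.pyRange 0 n 1).filter (fun i => decide (i ∉ notMinimal))).map
    (fun i => PySem.List.pyGetD explicacoes i [])

-- ===== PORT B =====
-- inner 'for j in order: … break' loop of Source B: returns the final value of 'minimal'
def altScan (explicacoes : List (List Int)) (i : Int) (si : List Int) : List Int → Bool
  | [] => true
  | j :: rest =>
    if (PySem.List.pyGetD explicacoes j []).length > si.length then true
    else if j ≠ i ∧ PySem.Set.issubset (PySem.List.pyGetD explicacoes j []) si then false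
    else altScan explicacoes i si rest

def get_minimal_explanations_alt (explicacoes : List (List Int)) : List (List Int) :=
  let n : Int := explicacoes.length
  let order : List Int :=
    PySem.List.sorted (PySem.List.pyRange 0 n 1)
      (fun k => ((PySem.List.pyGetD explicacoes k []).length : Int)) false
  (PySem.List.pyRange 0 n 1).foldl (fun res i =>
    if altScan explicacoes i (PySem.List.pyGetD explicacoes i []) order then
      res ++ [PySem.List.pyGetD explicacoes i []]
    else res) []

-- ===== PRECONDITION & SPEC =====
-- Pre_ states the set-representation invariant of the type convention (each inner list ports a
-- Python set, hence has distinct elements); A and B receive only such inputs.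
def Pre_get_minimal_explanations (explicacoes : List (List Int)) : Prop :=
  ∀ l ∈ explicacoes, l.Nodup
instance (explicacoes : List (List Int)) : Decidable (Pre_get_minimal_explanations explicacoes) := by
  unfold Pre_get_minimal_explanations; infer_instance
def pvWitness_get_minimal_explanations : List (List Int) := [[1, 2], [3], []]

def Spec_get_minimal_explanations (explicacoes : List (List Int)) (out : List (List Int)) : Prop := out = get_minimal_explanations_alt explicacoes
instance (explicacoes : List (List Int)) (out : List (List Int)) : Decidable (Spec_get_minimal_explanations explicacoes out) := by unfold Spec_get_minimal_explanations; infer_instance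

-- ===== CLAIM (what is proved, stated in full; the proofs are below) =====
def Claim_equal_get_minimal_explanations : Prop := ∀ (explicacoes : List (List Int)), Dom_get_minimal_explanations explicacoes → Pre_get_minimal_explanations explicacoes → Spec_get_minimal_explanations explicacoes (get_minimal_explanations explicacoes)

-- ===== LEMMAS AND PROOFS =====

lemma pvGet_nodup (ex : List (List Int)) (hpre : ∀ l ∈ ex, l.Nodup) (j : Int)
    (h0 : 0 ≤ j) (h1 : j < (ex.length : Int)) : (PySem.List.pyGetD ex j []).Nodup := by
  rw [PySem.List.pyGetD_eq_getElem ex [] h0 h1]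
  exact hpre _ (ex.getElem_mem _)

lemma mem_notMinimal (ex : List (List Int)) (x : Int) :
    (x ∈ (PySem.List.pyRange 0 (ex.length : Int) 1).foldl (fun acc i =>
      (PySem.List.pyRange 0 (ex.length : Int) 1).foldl (fun acc2 j =>
        if i ≠ j then
          if PySem.Set.issubset (PySem.List.pyGetD ex j []) (PySem.List.pyGetD ex i []) then
            acc2 ++ [i]
          else acc2
        else acc2) acc) []) ↔
    (x ∈ PySem.List.pyRange 0 (ex.length : Int) 1 ∧
      ∃ j ∈ PySem.List.pyRange 0 (ex.length : Int) 1, j ≠ x ∧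
        PySem.Set.issubset (PySem.List.pyGetD ex j []) (PySem.List.pyGetD ex x []) = true) := by
  have hin : ∀ (i : Int) (acc : List Int),
      (PySem.List.pyRange 0 (ex.length : Int) 1).foldl (fun acc2 j =>
        if i ≠ j then
          if PySem.Set.issubset (PySem.List.pyGetD ex j []) (PySem.List.pyGetD ex i []) then
            acc2 ++ [i]
          else acc2
        else acc2) acc
      = acc ++ ((PySem.List.pyRange 0 (ex.length : Int) 1).filter
          (fun j => decide (i ≠ j) &&
            PySem.Set.issubset (PySem.List.pyGetD ex j []) (PySem.List.pyGetD ex i []))).map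
          (fun _ => i) := by
    intro i acc
    rw [← PySem.List.foldl_append_if
        (fun j => decide (i ≠ j) &&
          PySem.Set.issubset (PySem.List.pyGetD ex j []) (PySem.List.pyGetD ex i []))
        (fun _ => i)]
    apply PySem.List.foldl_congr_mem
    intro acc2 jx _
    by_cases hne : i ≠ jx
    · by_cases hsub : PySem.Set.issubset (PySem.List.pyGetD ex jx []) (PySem.List.pyGetD ex i []) = true
      · simp [hne, hsub]
      · simp [hne, hsub]
    · simp [hne]
  rw [PySem.List.foldl_congr_mem _ _ _ _ (fun acc i _ => hin i acc)]
  rw [PySem.List.foldl_append_eq_flatMap]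
  simp only [List.nil_append, List.mem_flatMap, List.mem_map, List.mem_filter,
    Bool.and_eq_true, decide_eq_true_eq]
  constructor
  · rintro ⟨a, haR, j, ⟨⟨hjR, hne, hsub⟩, rfl⟩⟩
    exact ⟨haR, j, hjR, Ne.symm hne, hsub⟩
  · rintro ⟨hxR, j, hjR, hne, hsub⟩
    exact ⟨x, hxR, j, ⟨⟨hjR, Ne.symm hne, hsub⟩, rfl⟩⟩

lemma altScan_spec (ex : List (List Int)) (i : Int) (si : List Int)
    (L : List Int)
    (hL : L.Pairwise (fun a b => ((PySem.List.pyGetD ex a []).length : Int) ≤ ((PySem.List.pyGetD ex b []).length : Int)))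
    (hnd : ∀ j ∈ L, (PySem.List.pyGetD ex j []).Nodup) :
    (altScan ex i si L = true ↔
      ∀ j ∈ L, ¬ (j ≠ i ∧ PySem.Set.issubset (PySem.List.pyGetD ex j []) si = true)) := by
  induction L with
  | nil => simp [altScan]
  | cons j rest ih =>
    rw [List.pairwise_cons] at hL
    rw [altScan]
    by_cases h1 : (PySem.List.pyGetD ex j []).length > si.length
    · rw [if_pos h1]
      refine ⟨fun _ => ?_, fun _ => rfl⟩
      rw [List.forall_mem_cons]
      refine ⟨?_, fun b hb => ?_⟩
      · rintro ⟨-, hsub⟩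
        have hs : PySem.List.pyGetD ex j [] ⊆ si :=
          fun y hy => (PySem.Set.issubset_iff _ _).1 hsub _ hy
        have := (List.subperm_of_subset (hnd j (List.mem_cons_self)) hs).length_le
        omega
      · rintro ⟨-, hsub⟩
        have hs : PySem.List.pyGetD ex b [] ⊆ si :=
          fun y hy => (PySem.Set.issubset_iff _ _).1 hsub _ hy
        have h2 := (List.subperm_of_subset (hnd b (List.mem_cons_of_mem _ hb)) hs).length_le
        have h3 := hL.1 b hb
        omega
    · rw [if_neg h1]
      by_cases h2 : j ≠ i ∧ PySem.Set.issubset (PySem.List.pyGetD ex j []) si = true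
      · rw [if_pos h2]
        refine ⟨fun h => absurd h (by simp), fun hc => ?_⟩
        rw [List.forall_mem_cons] at hc
        exact (hc.1 h2).elim
      · rw [if_neg h2]
        rw [ih hL.2 (fun b hb => hnd b (List.mem_cons_of_mem _ hb))]
        rw [List.forall_mem_cons]
        exact ⟨fun h => ⟨h2, h⟩, fun h => h.2⟩

theorem gme_eq (ex : List (List Int)) (hpre : ∀ l ∈ ex, l.Nodup) :
    get_minimal_explanations ex = get_minimal_explanations_alt ex := by
  simp only [get_minimal_explanations, get_minimal_explanations_alt]
  rw [PySem.List.foldl_append_if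
        (fun i => altScan ex i (PySem.List.pyGetD ex i [])
          (PySem.List.sorted (PySem.List.pyRange 0 (ex.length : Int) 1)
            (fun k => ((PySem.List.pyGetD ex k []).length : Int)) false))
        (fun i => PySem.List.pyGetD ex i [])]
  rw [List.nil_append]
  apply congrArg (List.map _)
  apply List.filter_congr
  intro i hi
  have hpair := PySem.List.sorted_pairwise (PySem.List.pyRange 0 (ex.length : Int) 1)
      (fun k => ((PySem.List.pyGetD ex k []).length : Int))
  have hnd : ∀ j ∈ PySem.List.sorted (PySem.List.pyRange 0 (ex.length : Int) 1)
      (fun k => ((PySem.List.pyGetD ex k []).length : Int)) false,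
      (PySem.List.pyGetD ex j []).Nodup := by
    intro j hj
    rw [PySem.List.mem_sorted, PySem.List.mem_pyRange_one] at hj
    exact pvGet_nodup ex hpre j hj.1 hj.2
  rw [Bool.eq_iff_iff, decide_eq_true_eq]
  rw [altScan_spec ex i _ _ hpair hnd]
  rw [mem_notMinimal ex i]
  constructor
  · intro h j hj
    rw [PySem.List.mem_sorted] at hj
    intro hc
    exact h ⟨hi, j, hj, hc.1, hc.2⟩
  · rintro h ⟨-, j, hjR, hne, hsub⟩
    exact h j (by rw [PySem.List.mem_sorted]; exact hjR) ⟨hne, hsub⟩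

-- ===== VERDICT (by name: the statement is the Claim_ definition above) =====
theorem get_minimal_explanations_spec : Claim_equal_get_minimal_explanations := by
  intro ex _ hpre
  unfold Spec_get_minimal_explanations
  exact gme_eq ex hpre
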